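-- pv_equiv track=rewrite | github.com/Dasiel96/PetShopFinal2 | fill-content.py | cleanTextOfCite
-- ===== SOURCE A (Python) =====
-- def cleanTextOfCite(text):
--     include_char = True
--     clean_text = ""
--     for char in text:
--         if char == "[":
--             include_char = False
--         elif char == "]":
--             include_char = True
--             continue
--
--         if include_char:
--             clean_text += char
--     return clean_text
-- ===== SOURCE B (Python) =====
-- def cleanTextOfCite(text):
--     # Jump between brackets with str.find instead of scanning char-by-char with a flag.
--     out = []
--     while True:
--         i = text.find('[')
--         if i == -1:
--             out.append(text.replace(']', ''))
--             break
--         out.append(text[:i].replace(']', ''))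
--         rest = text[i + 1:]
--         j = rest.find(']')
--         if j == -1:
--             break
--         text = rest[j + 1:]
--     return ''.join(out)
-- ===== Notes on version B (the rewrite author's own statement) =====
-- stated objective: faster
-- what changed: Replaces the per-character boolean-flag loop with string concatenation by a loop that jumps between brackets with str.find, slices out each kept segment, strips leftover closing brackets with str.replace and joins the pieces at the end.
import Mathlib
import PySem

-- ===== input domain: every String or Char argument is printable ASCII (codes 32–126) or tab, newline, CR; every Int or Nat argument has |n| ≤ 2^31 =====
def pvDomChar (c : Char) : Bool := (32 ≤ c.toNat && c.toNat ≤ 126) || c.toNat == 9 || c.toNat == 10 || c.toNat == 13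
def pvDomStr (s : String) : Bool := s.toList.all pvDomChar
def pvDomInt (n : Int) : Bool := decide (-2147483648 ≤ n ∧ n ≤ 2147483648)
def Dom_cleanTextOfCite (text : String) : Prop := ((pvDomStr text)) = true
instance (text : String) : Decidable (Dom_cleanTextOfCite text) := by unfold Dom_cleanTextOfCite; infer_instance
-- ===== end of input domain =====

-- B replaces A's per-character flag loop by str.find jumps between slice/replace/join segment operations (measured faster in a timing run).

-- ===== PORT A =====
-- one loop step of A: state = (include_char, clean_text as List Char)
def cleanAStep (s : Bool × List Char) (c : Char) : Bool × List Char :=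
  if c = '[' then
    -- include_char = False; then the trailing 'if include_char' check (False here)
    (false, s.2)
  else if c = ']' then
    -- include_char = True; continue
    (true, s.2)
  else
    (s.1, if s.1 then s.2 ++ [c] else s.2)

def cleanTextOfCite (text : String) : String :=
  String.mk (text.toList.foldl cleanAStep (true, [])).2

-- ===== PORT B =====
-- the while loop of Source B: out is the accumulated list of pieces; returns the final out
def cleanAltGo (text : List Char) (out : List (List Char)) : List (List Char) :=
  let i := PySem.Chars.find text ['[']
  if hi : i = -1 then
    out ++ [PySem.Chars.replace text [']'] []]
  else
    let out' := out ++ [PySem.Chars.replace (PySem.List.slice text none (some i)) [']'] []]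
    let rest := PySem.List.slice text (some (i + 1)) none
    let j := PySem.Chars.find rest [']']
    if hj : j = -1 then
      out'
    else
      cleanAltGo (PySem.List.slice rest (some (j + 1)) none) out'
  termination_by text.length
  decreasing_by
    · have h1 := PySem.Chars.neg_one_le_find text ['[']
      have h0 : (0:Int) ≤ PySem.Chars.find text ['['] := by omega
      have hlen : (PySem.Chars.find text ['[']).toNat < text.length := by
        have := (PySem.Chars.find_spec (s := text) (sub := ['[']) h0).1
        rcases this with ⟨t, ht⟩
        have : (List.drop (PySem.Chars.find text ['[']).toNat text).length > 0 := by
          rw [← ht]; simp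
        simpa using Nat.lt_of_sub_pos (by simpa using this)
      have h2 := PySem.Chars.neg_one_le_find (PySem.List.slice text (some (PySem.Chars.find text ['['] + 1)) none) [']']
      rw [PySem.List.slice_from _ (by omega), PySem.List.slice_from _ (by omega)]
      simp only [List.length_drop]
      omega

def cleanTextOfCite_alt (text : String) : String :=
  String.mk (PySem.Chars.join [] (cleanAltGo text.toList []))

-- ===== PRECONDITION & SPEC =====
def Spec_cleanTextOfCite (text : String) (out : String) : Prop := out = cleanTextOfCite_alt text
instance (text : String) (out : String) : Decidable (Spec_cleanTextOfCite text out) := by unfold Spec_cleanTextOfCite; infer_instance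

-- ===== CLAIM (what is proved, stated in full; the proofs are below) =====
def Claim_equal_cleanTextOfCite : Prop := ∀ (text : String), Dom_cleanTextOfCite text → Spec_cleanTextOfCite text (cleanTextOfCite text)

-- ===== LEMMAS AND PROOFS =====

-- the common specification: cleanSpec b cs = what A's loop appends from state b
def cleanSpec (b : Bool) : List Char → List Char
  | [] => []
  | c :: t =>
    if c = '[' then cleanSpec false t
    else if c = ']' then cleanSpec true t
    else if b then c :: cleanSpec true t else cleanSpec false t

theorem foldl_cleanAStep (cs : List Char) : ∀ (b : Bool) (acc : List Char),
    (cs.foldl cleanAStep (b, acc)).2 = acc ++ cleanSpec b cs := by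
  induction cs with
  | nil => intro b acc; simp [cleanSpec]
  | cons c t ih =>
    intro b acc
    by_cases h1 : c = '['
    · simp [cleanAStep, cleanSpec, h1, ih]
    · by_cases h2 : c = ']'
      · simp [cleanAStep, cleanSpec, h2, ih]
      · cases b <;> simp [cleanAStep, cleanSpec, h1, h2, ih]

-- replace s "]" "" removes every ']' (fuel induction over PySem.Chars.replace.go)
theorem replaceGo_singleton_nil (c : Char) : ∀ (fuel : Nat) (l acc : List Char),
    l.length ≤ fuel →
    PySem.Chars.replace.go [c] [] fuel l acc = acc.reverse ++ l.filter (fun x => x ≠ c) := by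
  intro fuel
  induction fuel with
  | zero =>
    intro l acc h
    have : l = [] := by cases l <;> simp_all
    subst this; simp [PySem.Chars.replace.go]
  | succ n ih =>
    intro l acc h
    cases l with
    | nil => simp [PySem.Chars.replace.go]
    | cons x t =>
      by_cases hx : x = c
      · subst hx
        have hpf : [x].isPrefixOf (x :: t) = true := by simp [List.isPrefixOf]
        simp only [PySem.Chars.replace.go, hpf, if_pos, List.length_cons,
          List.length_nil, List.drop_succ_cons, List.drop_zero, List.reverse_nil,
          List.nil_append]
        rw [ih t acc (by simpa using h)]
        simp
      · have hpf : [c].isPrefixOf (x :: t) = false := by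
          simp [List.isPrefixOf]; exact fun h' => hx h'.symm
        simp only [PySem.Chars.replace.go, hpf, if_neg, Bool.false_eq_true, not_false_iff]
        rw [ih t (x :: acc) (by simpa using h)]
        simp [hx]

theorem replace_singleton_nil (s : List Char) (c : Char) :
    PySem.Chars.replace s [c] [] = s.filter (fun x => x ≠ c) := by
  simpa using replaceGo_singleton_nil c s.length s [] le_rfl

-- find s [c] = n ≥ 0 decomposes s at the FIRST occurrence of c
theorem find_char_decomp (s : List Char) (c : Char)
    (h : PySem.Chars.find s [c] ≠ -1) :
    (PySem.Chars.find s [c]).toNat < s.length ∧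
    c ∉ s.take (PySem.Chars.find s [c]).toNat ∧
    s = s.take (PySem.Chars.find s [c]).toNat ++ c :: s.drop ((PySem.Chars.find s [c]).toNat + 1) := by
  have h0 : (0:Int) ≤ PySem.Chars.find s [c] := by
    have := PySem.Chars.neg_one_le_find s [c]; omega
  obtain ⟨hpre, hmin⟩ := PySem.Chars.find_spec (s := s) (sub := [c]) h0
  set n := (PySem.Chars.find s [c]).toNat with hn
  obtain ⟨t, ht⟩ := hpre
  have hlen : n < s.length := by
    have : (s.drop n).length > 0 := by rw [← ht]; simp
    simp at this; omega
  constructor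
  · exact hlen
  constructor
  · intro hmem
    obtain ⟨i, hi, hieq⟩ := List.getElem_of_mem hmem
    have hi' : i < n := by simp at hi; omega
    have hilen : i < s.length := by omega
    have hgi : s[i]'hilen = c := by rw [← hieq]; simp [List.getElem_take]
    apply hmin i hi'
    refine ⟨s.drop (i + 1), ?_⟩
    rw [List.drop_eq_getElem_cons hilen, hgi]
    rfl
  · conv_lhs => rw [← List.take_append_drop n s]
    congr 1
    have ht2 : t = s.drop (n + 1) := by
      have := congrArg (List.drop 1) ht
      simpa [List.drop_drop, Nat.add_comm] using this
    rw [← ht, ht2]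
    rfl

theorem find_char_eq_neg_one_iff (s : List Char) (c : Char) :
    PySem.Chars.find s [c] = -1 ↔ c ∉ s := by
  rw [PySem.Chars.find_eq_neg_one_iff]
  constructor
  · intro h hc
    exact h ((List.singleton_infix_iff c s).2 hc)
  · intro h hinf
    exact h ((List.singleton_infix_iff c s).1 hinf)

theorem cleanSpec_true_no_open (p : List Char) (rest : List Char) (hp : '[' ∉ p) :
    cleanSpec true (p ++ rest) = p.filter (fun x => x ≠ ']') ++ cleanSpec true rest := by
  induction p with
  | nil => simp
  | cons x t ih =>
    have hx : x ≠ '[' := by intro h; exact hp (by simp [h])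
    have ht : '[' ∉ t := fun h => hp (by simp [h])
    by_cases h2 : x = ']'
    · simp [cleanSpec, h2, ih ht]
    · simp [cleanSpec, hx, h2, ih ht]

theorem cleanSpec_false_no_close (q : List Char) (rest : List Char) (hq : ']' ∉ q) :
    cleanSpec false (q ++ rest) = cleanSpec false rest := by
  induction q with
  | nil => simp
  | cons x t ih =>
    have hx : x ≠ ']' := by intro h; exact hq (by simp [h])
    have ht : ']' ∉ t := fun h => hq (by simp [h])
    by_cases h1 : x = '['
    · simp [cleanSpec, h1, ih ht]
    · simp [cleanSpec, hx, h1, ih ht]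

theorem join_nil_eq_flatten (ps : List (List Char)) :
    PySem.Chars.join [] ps = ps.flatten := by
  simp [PySem.Chars.join, List.intercalate]
  induction ps with
  | nil => simp
  | cons x t ih => cases t <;> simp_all [List.intersperse]

theorem cleanAltGo_spec (n : Nat) : ∀ (cs : List Char), cs.length ≤ n → ∀ (out : List (List Char)),
    (cleanAltGo cs out).flatten = out.flatten ++ cleanSpec true cs := by
  induction n with
  | zero =>
    intro cs hcs out
    have : cs = [] := by cases cs <;> simp_all
    subst this
    rw [cleanAltGo]
    have : PySem.Chars.find [] ['['] = -1 := (find_char_eq_neg_one_iff [] '[').2 (by simp)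
    simp [this, replace_singleton_nil, cleanSpec]
  | succ n ih =>
    intro cs hcs out
    rw [cleanAltGo]
    by_cases hi : PySem.Chars.find cs ['['] = -1
    · have hno : '[' ∉ cs := (find_char_eq_neg_one_iff cs '[').1 hi
      have : cleanSpec true cs = cs.filter (fun x => x ≠ ']') := by
        simpa [cleanSpec] using cleanSpec_true_no_open cs [] hno
      simp [hi, replace_singleton_nil, this]
    · simp only [hi, dif_neg, not_false_iff]
      have h0 : (0:Int) ≤ PySem.Chars.find cs ['['] := by
        have := PySem.Chars.neg_one_le_find cs ['[']; omega
      obtain ⟨hlt, hpre, hdec⟩ := find_char_decomp cs '[' hi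
      set i := (PySem.Chars.find cs ['[']).toNat with hidef
      have hslice_to : PySem.List.slice cs none (some (PySem.Chars.find cs ['['])) = cs.take i := by
        rw [PySem.List.slice_to _ h0]
      have hslice_from : PySem.List.slice cs (some (PySem.Chars.find cs ['['] + 1)) none = cs.drop (i + 1) := by
        rw [PySem.List.slice_from _ (by omega)]
        congr 1
        omega
      set rest := cs.drop (i + 1) with hrest
      have hcsspec : cleanSpec true cs = (cs.take i).filter (fun x => x ≠ ']') ++ cleanSpec false rest := by
        conv_lhs => rw [hdec]
        rw [cleanSpec_true_no_open _ _ hpre]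
        simp [cleanSpec]
      by_cases hj : PySem.Chars.find rest [']'] = -1
      · have hno : ']' ∉ rest := (find_char_eq_neg_one_iff rest ']').1 hj
        have : cleanSpec false rest = [] := by
          simpa [cleanSpec] using cleanSpec_false_no_close rest [] hno
        simp [hslice_from, hslice_to, hj, replace_singleton_nil, hcsspec, this]
      · simp only [hslice_from, hslice_to, hj, dif_neg, not_false_iff]
        have hj0 : (0:Int) ≤ PySem.Chars.find rest [']'] := by
          have := PySem.Chars.neg_one_le_find rest [']']; omega
        obtain ⟨hlt2, hpre2, hdec2⟩ := find_char_decomp rest ']' hj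
        set j := (PySem.Chars.find rest [']']).toNat with hjdef
        have hslice2 : PySem.List.slice rest (some (PySem.Chars.find rest [']'] + 1)) none = rest.drop (j + 1) := by
          rw [PySem.List.slice_from _ (by omega)]
          congr 1
          omega
        have hlen2 : (rest.drop (j + 1)).length ≤ n := by
          have : rest.length ≤ cs.length - (i + 1) := by simp [hrest]
          simp only [List.length_drop]
          omega
        rw [hslice2, ih _ hlen2]
        have hrestspec : cleanSpec false rest = cleanSpec true (rest.drop (j + 1)) := by
          conv_lhs => rw [hdec2]
          rw [cleanSpec_false_no_close _ _ hpre2]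
          simp [cleanSpec]
        simp [hcsspec, hrestspec, replace_singleton_nil]

-- ===== VERDICT (by name: the statement is the Claim_ definition above) =====
theorem cleanTextOfCite_spec : Claim_equal_cleanTextOfCite := by
  intro text _
  unfold Spec_cleanTextOfCite cleanTextOfCite cleanTextOfCite_alt
  rw [join_nil_eq_flatten, cleanAltGo_spec text.toList.length text.toList le_rfl []]
  rw [foldl_cleanAStep]
  simp
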